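-- pv_equiv track=rewrite | github.com/YangSunkue/Baekjoon | 프로그래머스/3/258709. 주사위 고르기/주사위 고르기.py | solution
-- ===== SOURCE A (Python) =====
-- from itertools import combinations, product
--
-- def binary_search(arr, target):
--     """
--     이분 탐색
--     정렬된 점수 합 리스트를 받아, target보다 작은 요소의 개수를 반환합니다.
--     """
--
--     start = 0
--     end = len(arr) - 1
--     result = 0
--
--     while start <= end:
--
--         mid = (start + end) // 2
--
--         if arr[mid] < target:
--             result = mid + 1
--             start = mid + 1
--
--         else:
--             end = mid - 1
--
--     return result
--
-- def get_all_sums(dices):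
--     """
--     주사위 리스트를 받아, 정렬된 모든 합 경우의 수 리스트를 리턴합니다.
--     순서를 고려하는 product 입니다.
--     """
--
--     result = [sum(scores) for scores in product(*dices)]
--     return sorted(result)
--
-- def solution(dice):
--     """
--     주사위 고르는 경우의 수 구하기 C(n,r) (combination)
--     고른 주사위에 대한 점수 합 각각 구하기(6^r + 6^r) (product)
--     이분 탐색으로 A가 이기는 횟수 구하기
--     -> A의 모든 합을 순회하며, B합 리스트에 대해 이분 탐색
--     """
--
--     n = len(dice)
--
--     # A가 선택한 모든 주사위 인덱스 리스트
--     a_all_dices_idx = list(combinations(range(n), n//2))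
--
--     max_win_count = -1
--     result = []
--
--     # A가 선택한 모든 주사위 경우의 수에 대해 반복
--     for a_dices_idx in a_all_dices_idx:
--
--         # B가 선택한 주사위 인덱스
--         b_dices_idx = [i for i in range(n) if i not in a_dices_idx]
--
--         # 인덱스를 실제 주사위 값으로 변환
--         a_dices = [dice[i] for i in a_dices_idx]
--         b_dices = [dice[i] for i in b_dices_idx]
--
--         # 선택한 주사위로 모든 점수 합 경우의 수 구하기 (각 7776개)
--         a_sums = get_all_sums(a_dices)
--         b_sums = get_all_sums(b_dices)
--
--         # 이분 탐색으로 A의 승리 횟수 구하기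
--         win_count = 0
--         for a_sum in a_sums:
--             win_count += binary_search(b_sums, a_sum)
--
--         # 승리 횟수 최대값 갱신 및 리턴값 생성
--         if win_count > max_win_count:
--             max_win_count = win_count
--             result = [i + 1 for i in a_dices_idx]
--
--     return sorted(result)
-- ===== SOURCE B (Python) =====
-- from itertools import combinations
--
--
-- def sum_histogram(dices):
--     """Convolve the per-die face distributions into a histogram {sum: count}."""
--     h = {0: 1}
--     for die in dices:
--         nh = {}
--         for s, c in h.items():
--             for f in die:
--                 nh[s + f] = nh.get(s + f, 0) + c
--         h = nh
--     return h
--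
--
-- def win_count(ha, hb):
--     """Sum over A-sums v of count(v) * (#B-sums < v), by merging the two
--     sorted histograms with a running prefix sum instead of searching."""
--     sa = sorted(ha.items(), key=lambda p: p[0])
--     sb = sorted(hb.items(), key=lambda p: p[0])
--     win = 0
--     cum = 0
--     j = 0
--     for v, c in sa:
--         while j < len(sb) and sb[j][0] < v:
--             cum += sb[j][1]
--             j += 1
--         win += c * cum
--     return win
--
--
-- def solution(dice):
--     n = len(dice)
--     max_win_count = -1
--     best = ()
--     for a_idx in combinations(range(n), n // 2):
--         b_idx = [i for i in range(n) if i not in a_idx]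
--         ha = sum_histogram([dice[i] for i in a_idx])
--         hb = sum_histogram([dice[i] for i in b_idx])
--         wc = win_count(ha, hb)
--         if wc > max_win_count:
--             max_win_count = wc
--             best = a_idx
--     return [i + 1 for i in best]
-- ===== Notes on version B (the rewrite author's own statement) =====
-- stated objective: faster
-- what changed: Instead of enumerating all 6^r face tuples per split and binary-searching each of A's sums in B's sorted sum list, B convolves the per-die face distributions into sum histograms (value -> count) and counts wins by merging the two key-sorted histograms with a running prefix sum of counts. (intended as faster; a timing run measured 2.27x at the largest size both finished).
import Mathlib
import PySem

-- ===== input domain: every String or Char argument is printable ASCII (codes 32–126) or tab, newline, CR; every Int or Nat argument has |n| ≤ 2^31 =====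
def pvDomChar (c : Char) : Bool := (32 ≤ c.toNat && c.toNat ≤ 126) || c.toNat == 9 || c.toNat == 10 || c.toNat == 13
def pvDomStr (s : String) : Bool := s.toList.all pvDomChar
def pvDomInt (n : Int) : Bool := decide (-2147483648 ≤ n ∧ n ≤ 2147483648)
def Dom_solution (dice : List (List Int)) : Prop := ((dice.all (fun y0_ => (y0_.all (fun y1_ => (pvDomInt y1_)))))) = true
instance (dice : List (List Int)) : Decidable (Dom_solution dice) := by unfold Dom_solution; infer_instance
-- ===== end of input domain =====

-- B replaces A's per-split enumeration of all face tuples plus per-sum binary search by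
-- convolved sum histograms merged with a running prefix sum of counts; intended as faster
-- (timing run measured 2.27x at the largest size where both implementations finished).

-- ===== PORT A =====

-- while-loop of binary_search; state (start, end, result), terminates because end - start shrinks
def binarySearchLoop (arr : List Int) (target : Int) (start stop result : Int) : Int :=
  if h : start ≤ stop then
    let mid := PySem.Int.floordiv (start + stop) 2
    if PySem.List.pyGetD arr mid 0 < target then
      binarySearchLoop arr target (mid + 1) stop (mid + 1)
    else
      binarySearchLoop arr target start (mid - 1) result
  else result
termination_by (stop + 1 - start).toNat
decreasing_by
  · have hb := PySem.Int.floordiv_two_mid_bounds h; omega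
  · have hb := PySem.Int.floordiv_two_mid_bounds h; omega

def binarySearch (arr : List Int) (target : Int) : Int :=
  binarySearchLoop arr target 0 (PySem.List.len arr - 1) 0

-- [sum(scores) for scores in product(*dices)] in itertools.product order
def prodSums : List (List Int) → List Int
  | [] => [0]
  | d :: rest => d.flatMap (fun f => (prodSums rest).map (fun s => f + s))

def getAllSums (dices : List (List Int)) : List Int :=
  PySem.List.sorted (prodSums dices) (fun x => x) false

-- itertools.combinations(l, k), in itertools order
def combos : List Int → Nat → List (List Int)
  | _, 0 => [[]]
  | [], _ + 1 => []
  | x :: xs, k + 1 => ((combos xs k).map (fun c => x :: c)) ++ combos xs (k + 1)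

-- body of A's loop over the candidate index sets; state (max_win_count, result)
def stepA (dice : List (List Int)) (n : Int) (st : Int × List Int) (aIdx : List Int) : Int × List Int :=
  let bIdx := (PySem.List.pyRange 0 n 1).filter (fun i => !(aIdx.contains i))
  let aSums := getAllSums (aIdx.map (fun i => PySem.List.pyGetD dice i []))
  let bSums := getAllSums (bIdx.map (fun i => PySem.List.pyGetD dice i []))
  let win := aSums.foldl (fun acc a => acc + binarySearch bSums a) 0
  if win > st.1 then (win, aIdx.map (fun i => i + 1)) else st

def solution (dice : List (List Int)) : List Int :=
  let n := PySem.List.len dice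
  let allIdx := combos (PySem.List.pyRange 0 n 1) ((PySem.Int.floordiv n 2).toNat)
  let st := allIdx.foldl (stepA dice n) (-1, [])
  PySem.List.sorted st.2 (fun x => x) false

-- ===== PORT B =====

-- one convolution step: h := {s+f : c summed over s in h, f in die}
def convStep (h : PySem.Dict Int Int) (die : List Int) : PySem.Dict Int Int :=
  h.items.foldl
    (fun nh sc =>
      die.foldl (fun nh f => nh.insert (sc.1 + f) (nh.getD (sc.1 + f) 0 + sc.2)) nh)
    PySem.Dict.empty

def sumHistogram (dices : List (List Int)) : PySem.Dict Int Int :=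
  dices.foldl convStep (PySem.Dict.ofList [((0 : Int), (1 : Int))])

-- while-loop advancing the merge pointer: drop leading b-entries with key < v, accumulating counts
def advance (v : Int) : List (Int × Int) → Int → List (Int × Int) × Int
  | [], cum => ([], cum)
  | wd :: rest, cum => if wd.1 < v then advance v rest (cum + wd.2) else (wd :: rest, cum)

-- merge the two key-sorted histograms; cum is the running prefix sum of b-counts below v
def winCountB (ha hb : PySem.Dict Int Int) : Int :=
  let sa := PySem.List.sorted ha.items (fun p => p.1) false
  let sb := PySem.List.sorted hb.items (fun p => p.1) false
  (sa.foldl (fun st vc =>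
      let rc := advance vc.1 st.1 st.2.1
      (rc.1, rc.2, st.2.2 + vc.2 * rc.2)) (sb, 0, 0)).2.2

-- body of B's loop; state (max_win_count, best index set)
def stepB (dice : List (List Int)) (n : Int) (st : Int × List Int) (aIdx : List Int) : Int × List Int :=
  let bIdx := (PySem.List.pyRange 0 n 1).filter (fun i => !(aIdx.contains i))
  let ha := sumHistogram (aIdx.map (fun i => PySem.List.pyGetD dice i []))
  let hb := sumHistogram (bIdx.map (fun i => PySem.List.pyGetD dice i []))
  let win := winCountB ha hb
  if win > st.1 then (win, aIdx) else st

def solution_alt (dice : List (List Int)) : List Int :=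
  let n := PySem.List.len dice
  let st := (combos (PySem.List.pyRange 0 n 1) ((PySem.Int.floordiv n 2).toNat)).foldl
    (stepB dice n) (-1, [])
  st.2.map (fun i => i + 1)

-- ===== PRECONDITION & SPEC =====
def Spec_solution (dice : List (List Int)) (out : List Int) : Prop := out = solution_alt dice
instance (dice : List (List Int)) (out : List Int) : Decidable (Spec_solution dice out) := by unfold Spec_solution; infer_instance

-- ===== CLAIM (what is proved, stated in full; the proofs are below) =====
def Claim_equal_solution : Prop := ∀ (dice : List (List Int)), Dom_solution dice → Spec_solution dice (solution dice)

-- ===== LEMMAS AND PROOFS =====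

-- multiset (as a list) described by a histogram's items
def msOf (l : List (Int × Int)) : List Int := l.flatMap (fun vc => List.replicate vc.2.toNat vc.1)

def toMS (h : PySem.Dict Int Int) : List Int := msOf h.items

-- invariant of every histogram in play: unique keys, nonnegative counts
def GoodH (h : PySem.Dict Int Int) : Prop := h.keys.Nodup ∧ ∀ p ∈ h.items, 0 ≤ p.2

-- ---- binary search ----

theorem countP_of_index_iff (l : List Int) (p : Int → Bool) (k : Nat) (hk : k ≤ l.length)
    (h : ∀ i (hi : i < l.length), p l[i] = true ↔ i < k) : l.countP p = k := by
  induction l generalizing k with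
  | nil => simp at hk; simp [hk]
  | cons x xs ih =>
    cases k with
    | zero =>
      have hx : ¬ p x = true := by
        intro hpx
        exact absurd ((h 0 (by simp)).mp hpx) (by omega)
      have hxs : xs.countP p = 0 := by
        apply ih 0 (by omega)
        intro i hi
        constructor
        · intro hpi
          exact absurd ((h (i + 1) (by simp; omega)).mp (by simpa using hpi)) (by omega)
        · omega
      simp [hx, hxs]
    | succ k' =>
      have hx : p x = true := (h 0 (by simp)).mpr (by omega)
      have hxs : xs.countP p = k' := by
        apply ih k' (by simp at hk; omega)
        intro i hi
        have := h (i + 1) (by simp; omega)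
        simpa [Nat.succ_lt_succ_iff] using this
      simp [hx, hxs]

theorem bs_countP_eq (arr : List Int) (t : Int) (start : Int) (h0 : 0 ≤ start)
    (hlen : start ≤ (arr.length : Int))
    (hlo : ∀ i : Nat, (hi : i < arr.length) → (i : Int) < start → arr[i] < t)
    (hge : ∀ i : Nat, (hi : i < arr.length) → start ≤ (i : Int) → ¬ arr[i] < t) :
    ((arr.countP (fun x => decide (x < t)) : Nat) : Int) = start := by
  have hc : arr.countP (fun x => decide (x < t)) = start.toNat := by
    apply countP_of_index_iff arr _ start.toNat (by omega)
    intro i hi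
    constructor
    · intro hp
      by_contra hlt
      exact hge i hi (by omega) (by simpa using hp)
    · intro hlt
      simpa using hlo i hi (by omega)
  rw [hc]; omega

theorem binarySearchLoop_eq (arr : List Int) (t : Int) (hs : arr.Pairwise (· ≤ ·)) :
    ∀ (fuel : Nat) (start stop result : Int), (stop + 1 - start).toNat ≤ fuel →
    0 ≤ start → stop < (arr.length : Int) → start ≤ stop + 1 → result = start →
    (∀ i : Nat, (hi : i < arr.length) → (i : Int) < start → arr[i] < t) →
    (∀ i : Nat, (hi : i < arr.length) → stop < (i : Int) → ¬ arr[i] < t) →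
    binarySearchLoop arr t start stop result = ((arr.countP (fun x => decide (x < t)) : Nat) : Int) := by
  have hmono := List.pairwise_iff_getElem.mp hs
  intro fuel
  induction fuel with
  | zero =>
    intro start stop result hf h0 h1 h2 hres hlo hhi
    have hss : ¬ start ≤ stop := by omega
    rw [binarySearchLoop, dif_neg hss, hres]
    exact (bs_countP_eq arr t start h0 (by omega) hlo
      (fun i hi hge => hhi i hi (by omega))).symm
  | succ fuel ih =>
    intro start stop result hf h0 h1 h2 hres hlo hhi
    by_cases hss : start ≤ stop
    · have hb := PySem.Int.floordiv_two_mid_bounds hss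
      set mid := PySem.Int.floordiv (start + stop) 2 with hmid
      have hmid0 : 0 ≤ mid := by omega
      have hmidlt : mid < (arr.length : Int) := by omega
      have hmidn : mid.toNat < arr.length := by omega
      have hget : PySem.List.pyGetD arr mid 0 = arr[mid.toNat] :=
        PySem.List.pyGetD_eq_getElem arr 0 hmid0 hmidlt
      rw [binarySearchLoop, dif_pos hss]
      simp only [← hmid, hget]
      by_cases hcmp : arr[mid.toNat] < t
      · rw [if_pos hcmp]
        apply ih (mid + 1) stop (mid + 1) (by omega) (by omega) h1 (by omega) rfl
        · intro i hi hilt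
          rcases lt_or_eq_of_le (show (i : Int) ≤ mid by omega) with hlt | heq
          · exact lt_of_le_of_lt (hmono i mid.toNat hi hmidn (by omega)) hcmp
          · have : i = mid.toNat := by omega
            simpa [this] using hcmp
        · exact hhi
      · rw [if_neg hcmp]
        apply ih start (mid - 1) result (by omega) h0 (by omega) (by omega) hres hlo
        intro i hi higt
        rcases lt_or_eq_of_le (show mid ≤ (i : Int) by omega) with hlt | heq
        · intro habs
          exact hcmp (lt_of_le_of_lt (hmono mid.toNat i hmidn hi (by omega)) habs)
        · have : i = mid.toNat := by omega
          simpa [this] using hcmp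
    · rw [binarySearchLoop, dif_neg hss, hres]
      exact (bs_countP_eq arr t start h0 (by omega) hlo
        (fun i hi hge => hhi i hi (by omega))).symm

theorem binarySearch_eq (arr : List Int) (t : Int) (hs : arr.Pairwise (· ≤ ·)) :
    binarySearch arr t = ((arr.countP (fun x => decide (x < t)) : Nat) : Int) := by
  have := binarySearchLoop_eq arr t hs ((PySem.List.len arr - 1) + 1 - 0).toNat 0
    (PySem.List.len arr - 1) 0 le_rfl le_rfl (by simp only [PySem.List.len_eq]; omega)
    (by simp only [PySem.List.len_eq]; omega) rfl (by intro i hi h; omega)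
    (by intro i hi h; simp only [PySem.List.len_eq] at h; omega)
  simpa [binarySearch] using this

-- ---- histogram correctness ----

theorem goodH_init : GoodH (PySem.Dict.ofList [((0 : Int), (1 : Int))]) := by
  unfold GoodH; refine ⟨by decide, ?_⟩; decide

theorem map_overwrite_id (l : List (Int × Int)) (k v' : Int) (h : k ∉ l.map Prod.fst) :
    l.map (fun p => if p.1 == k then (k, v') else p) = l := by
  induction l with
  | nil => rfl
  | cons p rest ih =>
    simp only [List.map_cons, List.mem_cons, not_or] at h
    simp only [List.map_cons]
    rw [if_neg (by simpa using fun e : p.1 = k => h.1 e.symm), ih h.2]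

theorem msOf_overwrite (l : List (Int × Int)) (k m c : Int) (hnd : (l.map Prod.fst).Nodup)
    (hmem : (k, m) ∈ l) (hm : 0 ≤ m) (hc : 0 ≤ c) :
    (msOf (l.map (fun p => if p.1 == k then (k, m + c) else p))).Perm
      (List.replicate c.toNat k ++ msOf l) := by
  induction l with
  | nil => simp at hmem
  | cons p rest ih =>
    simp only [List.map_cons, List.nodup_cons] at hnd
    by_cases hk : p.1 = k
    · have hp : p = (k, m) := by
        rcases List.mem_cons.mp hmem with h | h
        · exact h.symm
        · exact absurd (by simpa [← hk] using List.mem_map_of_mem (f := Prod.fst) h) hnd.1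
      subst hp
      have hrest := map_overwrite_id rest k (m + c) (by simpa using hnd.1)
      have hsplit : List.replicate (m + c).toNat k = List.replicate c.toNat k ++ List.replicate m.toNat k := by
        rw [← List.replicate_add]; congr 1; omega
      simp only [msOf, List.map_cons, List.flatMap_cons, beq_self_eq_true, if_true]
      rw [hrest, hsplit, List.append_assoc]
    · have hmem' : (k, m) ∈ rest := by
        rcases List.mem_cons.mp hmem with h | h
        · exact absurd (by rw [← h]) hk
        · exact h
      have hperm := ih hnd.2 hmem'
      simp only [List.map_cons]
      rw [if_neg (show ¬ ((p.1 == k) = true) by simpa using hk)]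
      simp only [msOf, List.flatMap_cons] at hperm ⊢
      refine (hperm.append_left (List.replicate p.2.toNat p.1)).trans ?_
      have hsw := (List.perm_append_comm (l₁ := List.replicate p.2.toNat p.1)
        (l₂ := List.replicate c.toNat k)).append_right
        (rest.flatMap fun vc => List.replicate vc.2.toNat vc.1)
      simpa [List.append_assoc] using hsw

theorem getD_nonneg (nh : PySem.Dict Int Int) (k : Int) (hg : GoodH nh) : 0 ≤ nh.getD k 0 := by
  rw [PySem.Dict.getD_eq_get?_getD]
  cases hget : nh.get? k with
  | none => simp
  | some m =>
    have := PySem.Dict.mem_items_of_get?_eq_some nh hget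
    simpa using hg.2 _ this

theorem toMS_insert_add (nh : PySem.Dict Int Int) (k c : Int) (hc : 0 ≤ c) (hg : GoodH nh) :
    (toMS (nh.insert k (nh.getD k 0 + c))).Perm (List.replicate c.toNat k ++ toMS nh) := by
  unfold toMS
  rw [PySem.Dict.items_insert]
  by_cases hcon : nh.contains k = true
  · rw [if_pos hcon]
    obtain ⟨m, hm⟩ : ∃ m, nh.get? k = some m := by
      cases hget : nh.get? k with
      | none => rw [PySem.Dict.contains_eq_isSome_get?, hget] at hcon; simp at hcon
      | some m => exact ⟨m, rfl⟩
    have hmem : (k, m) ∈ nh.items := PySem.Dict.mem_items_of_get?_eq_some nh hm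
    have hmv : nh.getD k 0 = m := by rw [PySem.Dict.getD_eq_get?_getD, hm]; rfl
    rw [hmv]
    exact msOf_overwrite nh.items k m c hg.1 hmem (by simpa using hg.2 _ hmem) hc
  · rw [if_neg hcon]
    rw [PySem.Dict.getD_of_not_contains nh 0 (by simpa using hcon)]
    simp only [msOf, List.flatMap_append, List.flatMap_cons, List.flatMap_nil, List.append_nil,
      zero_add]
    exact List.perm_append_comm

theorem goodH_insert_add (nh : PySem.Dict Int Int) (k c : Int) (hc : 0 ≤ c) (hg : GoodH nh) :
    GoodH (nh.insert k (nh.getD k 0 + c)) := by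
  refine ⟨PySem.Dict.nodup_keys_insert nh _ _ hg.1, ?_⟩
  intro p hp
  rcases (PySem.Dict.mem_items_insert nh _ _ p).mp hp with h | h
  · rw [h]
    have := getD_nonneg nh k hg
    simp; omega
  · exact hg.2 _ h.1

theorem inner_fold_spec (d : List Int) (s c : Int) (hc : 0 ≤ c) :
    ∀ nh : PySem.Dict Int Int, GoodH nh →
      GoodH (d.foldl (fun nh f => nh.insert (s + f) (nh.getD (s + f) 0 + c)) nh) ∧
      (toMS (d.foldl (fun nh f => nh.insert (s + f) (nh.getD (s + f) 0 + c)) nh)).Perm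
        (toMS nh ++ d.flatMap (fun f => List.replicate c.toNat (s + f))) := by
  induction d with
  | nil => intro nh hg; refine ⟨hg, ?_⟩; simp
  | cons f d' ih =>
    intro nh hg
    have hg' := goodH_insert_add nh (s + f) c hc hg
    have hins := toMS_insert_add nh (s + f) c hc hg
    obtain ⟨hgf, hpf⟩ := ih (nh.insert (s + f) (nh.getD (s + f) 0 + c)) hg'
    refine ⟨by simpa using hgf, ?_⟩
    simp only [List.foldl_cons, List.flatMap_cons]
    refine hpf.trans ?_
    refine (hins.append_right _).trans ?_
    have hsw := (List.perm_append_comm (l₁ := List.replicate c.toNat (s + f)) (l₂ := toMS nh)).append_right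
      (d'.flatMap fun f => List.replicate c.toNat (s + f))
    simpa [List.append_assoc] using hsw

theorem outer_fold_spec (ps : List (Int × Int)) (d : List Int) (hnn : ∀ p ∈ ps, 0 ≤ p.2) :
    ∀ nh : PySem.Dict Int Int, GoodH nh →
      GoodH (ps.foldl (fun nh sc => d.foldl (fun nh f => nh.insert (sc.1 + f) (nh.getD (sc.1 + f) 0 + sc.2)) nh) nh) ∧
      (toMS (ps.foldl (fun nh sc => d.foldl (fun nh f => nh.insert (sc.1 + f) (nh.getD (sc.1 + f) 0 + sc.2)) nh) nh)).Perm
        (toMS nh ++ ps.flatMap (fun sc => d.flatMap (fun f => List.replicate sc.2.toNat (sc.1 + f)))) := by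
  induction ps with
  | nil => intro nh hg; refine ⟨hg, ?_⟩; simp
  | cons sc ps' ih =>
    intro nh hg
    obtain ⟨hg', hp'⟩ := inner_fold_spec d sc.1 sc.2 (hnn sc (by simp)) nh hg
    obtain ⟨hgf, hpf⟩ := ih (fun p hp => hnn p (by simp [hp])) _ hg'
    refine ⟨by simpa using hgf, ?_⟩
    simp only [List.foldl_cons, List.flatMap_cons]
    refine hpf.trans ?_
    refine (hp'.append_right _).trans ?_
    rw [List.append_assoc]

theorem flatMap_replicate_eq {α : Type} (n : Nat) (s : α) (g : α → List α) :
    (List.replicate n s).flatMap g = (List.replicate n (g s)).flatMap id := by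
  induction n with
  | zero => rfl
  | succ n ih => simp only [List.replicate_succ, List.flatMap_cons, ih]; rfl

theorem count_flatMap_replicate (L : List Int) (n : Nat) (v : Int) :
    (L.flatMap (fun y => List.replicate n y)).count v = n * L.count v := by
  induction L with
  | nil => simp
  | cons y L ih =>
    simp only [List.flatMap_cons, List.count_append, ih, List.count_cons, List.count_replicate]
    rcases eq_or_ne y v with h | h
    · simp [h, Nat.mul_add]
      omega
    · simp [h]

theorem count_join_replicate (L : List Int) (n : Nat) (v : Int) :
    ((List.replicate n L).flatMap id).count v = n * L.count v := by
  induction n with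
  | zero => simp
  | succ n ih =>
    simp only [List.replicate_succ, List.flatMap_cons, List.count_append, ih, id]
    ring

theorem flatMap_replicate_perm (L : List Int) (n : Nat) :
    (L.flatMap (fun y => List.replicate n y)).Perm ((List.replicate n L).flatMap id) := by
  rw [List.perm_iff_count]
  intro v
  rw [count_flatMap_replicate, count_join_replicate]

theorem convStep_spec (h : PySem.Dict Int Int) (d : List Int) (hg : GoodH h) :
    GoodH (convStep h d) ∧
    (toMS (convStep h d)).Perm ((toMS h).flatMap (fun s => d.map (fun f => s + f))) := by
  have hge : GoodH PySem.Dict.empty := ⟨PySem.Dict.nodup_keys_empty, by intro p hp; simp [PySem.Dict.empty] at hp⟩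
  obtain ⟨hgf, hpf⟩ := outer_fold_spec h.items d hg.2 PySem.Dict.empty hge
  refine ⟨hgf, ?_⟩
  refine hpf.trans ?_
  have hemp : toMS PySem.Dict.empty = [] := rfl
  rw [hemp, List.nil_append]
  unfold toMS msOf
  rw [List.flatMap_assoc]
  apply List.Perm.flatMap_left
  intro vc _
  rw [flatMap_replicate_eq,
    ← List.flatMap_map (fun f => vc.1 + f) (fun y => List.replicate vc.2.toNat y) d]
  exact flatMap_replicate_perm (d.map (fun f => vc.1 + f)) vc.2.toNat

theorem hist_fold_spec (dices : List (List Int)) :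
    ∀ h : PySem.Dict Int Int, GoodH h →
      GoodH (dices.foldl convStep h) ∧
      (toMS (dices.foldl convStep h)).Perm
        ((toMS h).flatMap (fun s => (prodSums dices).map (fun p => s + p))) := by
  induction dices with
  | nil =>
    intro h hg
    refine ⟨hg, ?_⟩
    simp [prodSums]
  | cons d rest ih =>
    intro h hg
    obtain ⟨hg', hp'⟩ := convStep_spec h d hg
    obtain ⟨hgf, hpf⟩ := ih (convStep h d) hg'
    refine ⟨by simpa using hgf, ?_⟩
    simp only [List.foldl_cons]
    refine hpf.trans ?_
    refine (List.Perm.flatMap_right _ hp').trans ?_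
    rw [List.flatMap_assoc]
    apply List.Perm.flatMap_left
    intro s _
    have heq : (d.map (fun f => s + f)).flatMap (fun u => (prodSums rest).map (fun p => u + p))
        = (prodSums (d :: rest)).map (fun p => s + p) := by
      simp only [prodSums, List.map_flatMap, List.flatMap_map, List.map_map]
      congr 1
      funext a
      congr 1
      funext p
      simp [Function.comp]
      ring
    rw [heq]

theorem sumHistogram_spec (dices : List (List Int)) :
    GoodH (sumHistogram dices) ∧ (toMS (sumHistogram dices)).Perm (prodSums dices) := by
  obtain ⟨hg, hp⟩ := hist_fold_spec dices _ goodH_init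
  refine ⟨hg, ?_⟩
  refine hp.trans ?_
  have : toMS (PySem.Dict.ofList [((0 : Int), (1 : Int))]) = [0] := rfl
  rw [this]
  simp

-- ---- win counts ----

theorem less_fold_eq (l : List (Int × Int)) (v : Int) (hnn : ∀ p ∈ l, 0 ≤ p.2) :
    ∀ acc : Int,
      l.foldl (fun less wd => if wd.1 < v then less + wd.2 else less) acc
        = acc + (((msOf l).countP (fun x => decide (x < v)) : Nat) : Int) := by
  induction l with
  | nil => intro acc; simp [msOf]
  | cons wd rest ih =>
    intro acc
    have hd : 0 ≤ wd.2 := hnn wd (by simp)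
    have ihr := ih (fun p hp => hnn p (by simp [hp]))
    simp only [List.foldl_cons, msOf, List.flatMap_cons, List.countP_append,
      List.countP_replicate]
    rw [show (rest.flatMap fun vc => List.replicate vc.2.toNat vc.1) = msOf rest from rfl]
    by_cases hw : wd.1 < v
    · rw [if_pos hw, if_pos (by simpa using hw), ihr]
      push_cast
      omega
    · rw [if_neg hw, if_neg (by simpa using hw), ihr]
      omega

theorem advance_split (v : Int) : ∀ (rem : List (Int × Int)) (cum : Int),
    ∃ dropped, rem = dropped ++ (advance v rem cum).1
      ∧ (advance v rem cum).2 = cum + (dropped.map (fun p => p.2)).sum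
      ∧ (∀ p ∈ dropped, p.1 < v)
      ∧ (∀ q, (advance v rem cum).1.head? = some q → ¬ q.1 < v) := by
  intro rem
  induction rem with
  | nil => intro cum; exact ⟨[], by simp [advance]⟩
  | cons wd rest ih =>
    intro cum
    by_cases hw : wd.1 < v
    · obtain ⟨dr, h1, h2, h3, h4⟩ := ih (cum + wd.2)
      refine ⟨wd :: dr, ?_, ?_, ?_, ?_⟩
      · simp only [advance, if_pos hw]; rw [List.cons_append, ← h1]
      · simp only [advance, if_pos hw]; rw [h2]; simp; ring
      · intro p hp; rcases List.mem_cons.mp hp with rfl | hp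
        · exact hw
        · exact h3 p hp
      · simpa only [advance, if_pos hw] using h4
    · exact ⟨[], by simp [advance, hw]; omega⟩

theorem sum_if_none (v : Int) : ∀ (l : List (Int × Int)) (acc : Int), (∀ p ∈ l, ¬ p.1 < v) →
    l.foldl (fun less wd => if wd.1 < v then less + wd.2 else less) acc = acc := by
  intro l
  induction l with
  | nil => intro acc _; rfl
  | cons wd rest ih =>
    intro acc h
    simp only [List.foldl_cons, if_neg (h wd (by simp))]
    exact ih acc (fun p hp => h p (List.mem_cons_of_mem _ hp))

theorem sum_if_split (v : Int) : ∀ (l1 l2 : List (Int × Int)) (acc : Int),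
    (∀ p ∈ l1, p.1 < v) → (∀ p ∈ l2, ¬ p.1 < v) →
    (l1 ++ l2).foldl (fun less wd => if wd.1 < v then less + wd.2 else less) acc
      = acc + (l1.map (fun p => p.2)).sum := by
  intro l1
  induction l1 with
  | nil => intro l2 acc _ h2; simpa using sum_if_none v l2 acc h2
  | cons wd rest ih =>
    intro l2 acc h1 h2
    simp only [List.cons_append, List.foldl_cons, if_pos (h1 wd (by simp))]
    rw [ih l2 (acc + wd.2) (fun p hp => h1 p (List.mem_cons_of_mem _ hp)) h2]
    simp [add_assoc]

theorem winFold_spec (sbAll : List (Int × Int)) (hsb : sbAll.Pairwise (fun p q => p.1 ≤ q.1)) :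
    ∀ (sa : List (Int × Int)), sa.Pairwise (fun p q => p.1 ≤ q.1) →
    ∀ (done rem : List (Int × Int)) (win : Int),
      sbAll = done ++ rem →
      (∀ p ∈ done, ∀ vc ∈ sa, p.1 < vc.1) →
      (sa.foldl (fun st vc =>
          let rc := advance vc.1 st.1 st.2.1
          (rc.1, rc.2, st.2.2 + vc.2 * rc.2)) (rem, (done.map (fun p => p.2)).sum, win)).2.2
        = win + (sa.map (fun vc => vc.2 *
            (sbAll.foldl (fun less wd => if wd.1 < vc.1 then less + wd.2 else less) 0))).sum := by
  intro sa
  induction sa with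
  | nil => intro _ done rem win _ _; simp
  | cons vc sa' ih =>
    intro hsa done rem win hsplit hdone
    rw [List.pairwise_cons] at hsa
    set rc := advance vc.1 rem ((done.map (fun p => p.2)).sum) with hrc
    obtain ⟨dr, h1, h2, h3, h4⟩ := advance_split vc.1 rem ((done.map (fun p => p.2)).sum)
    rw [← hrc] at h1 h2 h4
    have hsplit' : sbAll = (done ++ dr) ++ rc.1 := by
      rw [hsplit, h1, List.append_assoc]
    have hpairs : (rc.1).Pairwise (fun p q => p.1 ≤ q.1) := by
      have h' := hsb
      rw [hsplit'] at h'
      exact (List.pairwise_append.mp h').2.1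
    have hremge : ∀ q ∈ rc.1, ¬ q.1 < vc.1 := by
      intro q hq
      rcases hrem : rc.1 with _ | ⟨q0, tail⟩
      · rw [hrem] at hq; simp at hq
      · have hq0 := h4 q0 (by rw [hrem]; rfl)
        rw [hrem] at hq hpairs
        rcases List.mem_cons.mp hq with rfl | hq
        · exact hq0
        · have := (List.pairwise_cons.mp hpairs).1 q hq
          intro hlt; exact hq0 (lt_of_le_of_lt this hlt)
    have hcum' : rc.2 = (((done ++ dr).map (fun p => p.2)).sum) := by
      rw [h2]; simp [List.map_append]
    have hcnt : rc.2 = sbAll.foldl (fun less wd => if wd.1 < vc.1 then less + wd.2 else less) 0 := by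
      rw [hsplit']
      rw [sum_if_split vc.1 (done ++ dr) _ 0
        (by intro p hp
            rcases List.mem_append.mp hp with hp | hp
            · exact hdone p hp vc (by simp)
            · exact h3 p hp)
        hremge]
      rw [hcum']
      simp
    have hdone' : ∀ p ∈ done ++ dr, ∀ vc' ∈ sa', p.1 < vc'.1 := by
      intro p hp vc' hvc'
      rcases List.mem_append.mp hp with hp | hp
      · exact hdone p hp vc' (List.mem_cons_of_mem _ hvc')
      · exact lt_of_lt_of_le (h3 p hp) (hsa.1 vc' hvc')
    simp only [List.foldl_cons]
    rw [← hrc, hcum']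
    rw [ih hsa.2 (done ++ dr) rc.1
      (win + vc.2 * ((done ++ dr).map (fun p => p.2)).sum) hsplit' hdone']
    rw [← hcum', hcnt]
    simp only [List.map_cons, List.sum_cons]
    ring

theorem pair_sum_msOf (g : Int → Int) : ∀ (l : List (Int × Int)), (∀ p ∈ l, 0 ≤ p.2) →
    (l.map (fun vc => vc.2 * g vc.1)).sum = ((msOf l).map g).sum := by
  intro l
  induction l with
  | nil => intro _; simp [msOf]
  | cons vc rest ih =>
    intro hnn
    simp only [List.map_cons, List.sum_cons, msOf, List.flatMap_cons, List.map_append,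
      List.sum_append, List.map_replicate, List.sum_replicate, nsmul_eq_mul]
    rw [ih (fun p hp => hnn p (List.mem_cons_of_mem _ hp)),
      show ((vc.2.toNat : Nat) : Int) = vc.2 from by have := hnn vc (by simp); omega]
    rfl

theorem winCountB_eq (ha hb : PySem.Dict Int Int) (hga : GoodH ha) (hgb : GoodH hb) :
    winCountB ha hb
      = ((toMS ha).map (fun a => (((toMS hb).countP (fun x => decide (x < a)) : Nat) : Int))).sum := by
  unfold winCountB
  have hsbpw : (PySem.List.sorted hb.items (fun p => p.1) false).Pairwise (fun p q => p.1 ≤ q.1) :=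
    PySem.List.sorted_pairwise _ _
  have hsapw : (PySem.List.sorted ha.items (fun p => p.1) false).Pairwise (fun p q => p.1 ≤ q.1) :=
    PySem.List.sorted_pairwise _ _
  have h0 := winFold_spec _ hsbpw _ hsapw [] (PySem.List.sorted hb.items (fun p => p.1) false) 0
    rfl (by intro p hp; simp at hp)
  simp only [List.map_nil, List.sum_nil, zero_add] at h0
  rw [h0]
  have hnnB : ∀ p ∈ PySem.List.sorted hb.items (fun p => p.1) false, 0 ≤ p.2 :=
    fun p hp => hgb.2 p ((PySem.List.mem_sorted _ _ _ _).mp hp)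
  have hnnA : ∀ p ∈ PySem.List.sorted ha.items (fun p => p.1) false, 0 ≤ p.2 :=
    fun p hp => hga.2 p ((PySem.List.mem_sorted _ _ _ _).mp hp)
  have hmsB : (msOf (PySem.List.sorted hb.items (fun p => p.1) false)).Perm (toMS hb) :=
    List.Perm.flatMap_right _ (PySem.List.sorted_perm _ _ _)
  have hmsA : (msOf (PySem.List.sorted ha.items (fun p => p.1) false)).Perm (toMS ha) :=
    List.Perm.flatMap_right _ (PySem.List.sorted_perm _ _ _)
  rw [List.map_congr_left (fun vc (_ : vc ∈ PySem.List.sorted ha.items (fun p => p.1) false) => by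
    rw [less_fold_eq _ vc.1 hnnB 0, zero_add, hmsB.countP_eq])]
  rw [pair_sum_msOf (fun a => (((toMS hb).countP (fun x => decide (x < a)) : Nat) : Int)) _ hnnA]
  exact (hmsA.map _).sum_eq

theorem winA_eq (aD bD : List (List Int)) :
    (getAllSums aD).foldl (fun acc a => acc + binarySearch (getAllSums bD) a) 0
      = winCountB (sumHistogram aD) (sumHistogram bD) := by
  obtain ⟨hga, hpa⟩ := sumHistogram_spec aD
  obtain ⟨hgb, hpb⟩ := sumHistogram_spec bD
  have hpermA : (getAllSums aD).Perm (toMS (sumHistogram aD)) :=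
    (PySem.List.sorted_perm _ _ _).trans hpa.symm
  have hpermB : (getAllSums bD).Perm (toMS (sumHistogram bD)) :=
    (PySem.List.sorted_perm _ _ _).trans hpb.symm
  have hsorted : (getAllSums bD).Pairwise (· ≤ ·) := by
    have := PySem.List.sorted_pairwise (prodSums bD) (fun x => x)
    simpa [getAllSums] using this
  rw [PySem.List.foldl_add, zero_add, winCountB_eq _ _ hga hgb]
  rw [List.map_congr_left (fun a _ => binarySearch_eq (getAllSums bD) a hsorted)]
  rw [List.map_congr_left (fun a (_ : a ∈ getAllSums aD) => by
    rw [hpermB.countP_eq (fun x => decide (x < a))])]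
  exact (hpermA.map _).sum_eq

theorem combos_subset : ∀ (l : List Int) (k : Nat) (c : List Int), c ∈ combos l k →
    ∀ y ∈ c, y ∈ l := by
  intro l
  induction l with
  | nil =>
    intro k c hc
    cases k with
    | zero => simp [combos] at hc; simp [hc]
    | succ k => simp [combos] at hc
  | cons x xs ih =>
    intro k c hc
    cases k with
    | zero => simp [combos] at hc; simp [hc]
    | succ k =>
      simp only [combos, List.mem_append, List.mem_map] at hc
      rcases hc with ⟨c', hc', rfl⟩ | hc
      · intro y hy
        rcases List.mem_cons.mp hy with rfl | hy
        · simp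
        · exact List.mem_cons_of_mem _ (ih k c' hc' y hy)
      · intro y hy
        exact List.mem_cons_of_mem _ (ih (k + 1) c hc y hy)

theorem combos_pairwise : ∀ (l : List Int) (k : Nat), l.Pairwise (· < ·) → ∀ c ∈ combos l k,
    c.Pairwise (· < ·) := by
  intro l
  induction l with
  | nil =>
    intro k hl c hc
    cases k with
    | zero => simp [combos] at hc; simp [hc]
    | succ k => simp [combos] at hc
  | cons x xs ih =>
    intro k hl c hc
    rw [List.pairwise_cons] at hl
    cases k with
    | zero => simp [combos] at hc; simp [hc]
    | succ k =>
      simp only [combos, List.mem_append, List.mem_map] at hc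
      rcases hc with ⟨c', hc', rfl⟩ | hc
      · rw [List.pairwise_cons]
        exact ⟨fun y hy => hl.1 y (combos_subset xs k c' hc' y hy), ih k hl.2 c' hc'⟩
      · exact ih (k + 1) hl.2 c hc

theorem stepA_eq_stepB (dice : List (List Int)) (n : Int) (m : Int) (best aIdx : List Int) :
    stepA dice n (m, best.map (fun i => i + 1)) aIdx
      = ((stepB dice n (m, best) aIdx).1, (stepB dice n (m, best) aIdx).2.map (fun i => i + 1)) := by
  simp only [stepA, stepB]
  rw [winA_eq]
  split_ifs with hw
  · rfl
  · rfl

theorem loop_eq (dice : List (List Int)) (n : Int) (cs : List (List Int)) :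
    ∀ (m : Int) (best : List Int),
      cs.foldl (stepA dice n) (m, best.map (fun i => i + 1))
        = ((cs.foldl (stepB dice n) (m, best)).1, (cs.foldl (stepB dice n) (m, best)).2.map (fun i => i + 1)) := by
  induction cs with
  | nil => intro m best; rfl
  | cons c cs' ih =>
    intro m best
    simp only [List.foldl_cons]
    rw [stepA_eq_stepB]
    exact ih (stepB dice n (m, best) c).1 (stepB dice n (m, best) c).2

theorem loop_best_pairwise (dice : List (List Int)) (n : Int) (cs : List (List Int))
    (hcs : ∀ c ∈ cs, c.Pairwise (· < ·)) :
    ∀ (m : Int) (best : List Int), best.Pairwise (· < ·) →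
      ((cs.foldl (stepB dice n) (m, best)).2).Pairwise (· < ·) := by
  induction cs with
  | nil => intro m best hb; simpa using hb
  | cons c cs' ih =>
    intro m best hb
    simp only [List.foldl_cons]
    have hics : ∀ c' ∈ cs', c'.Pairwise (· < ·) := fun c' hc' => hcs c' (List.mem_cons_of_mem _ hc')
    rcases hst : stepB dice n (m, best) c with ⟨m', best'⟩
    have hb' : best'.Pairwise (· < ·) := by
      simp only [stepB] at hst
      split at hst
      · cases hst
        exact hcs c (by simp)
      · cases hst
        exact hb
    exact ih hics m' best' hb'

-- ===== VERDICT (by name: the statement is the Claim_ definition above) =====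
theorem solution_spec : Claim_equal_solution := by
  unfold Claim_equal_solution
  intro dice _
  unfold Spec_solution solution solution_alt
  simp only []
  have hrange : (PySem.List.pyRange 0 (PySem.List.len dice) 1).Pairwise (· < ·) := by
    rw [PySem.List.len_eq, PySem.List.pyRange_zero_natCast]
    exact List.pairwise_lt_range.map _ (fun a b h => by exact_mod_cast h)
  have hpw := combos_pairwise (PySem.List.pyRange 0 (PySem.List.len dice) 1)
    ((PySem.Int.floordiv (PySem.List.len dice) 2).toNat) hrange
  have hloop := loop_eq dice (PySem.List.len dice)
    (combos (PySem.List.pyRange 0 (PySem.List.len dice) 1)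
      ((PySem.Int.floordiv (PySem.List.len dice) 2).toNat)) (-1) []
  simp only [List.map_nil] at hloop
  rw [hloop]
  have hbest := loop_best_pairwise dice (PySem.List.len dice)
    (combos (PySem.List.pyRange 0 (PySem.List.len dice) 1)
      ((PySem.Int.floordiv (PySem.List.len dice) 2).toNat)) hpw (-1) [] (by simp)
  exact PySem.List.sorted_eq_self_of_pairwise _ _
    ((hbest.map _ (fun a b (h : a < b) => by omega)).imp (fun h => h))
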